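-- pv_equiv track=rewrite | github.com/Guardefi/landing1.2 | Desktop/Scorpius-Enterprise-masterr/Bytecode/core/comparison_engine.py | _identify_basic_blocks
-- ===== SOURCE A (Python) =====
-- from typing import Dict, List, Set, Tuple
--
-- def _identify_basic_blocks(opcodes: List[Dict]) -> List[List[Dict]]:
--     """Identify basic blocks in opcode sequence"""
--     blocks = []
--     current_block = []
--
--     for opcode in opcodes:
--         current_block.append(opcode)
--
--         # End block on control flow instructions
--         if opcode["mnemonic"] in ["JUMP", "JUMPI", "RETURN", "REVERT", "STOP"]:
--             blocks.append(current_block)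
--             current_block = []
--         # Also end block before JUMPDEST
--         elif opcode["mnemonic"] == "JUMPDEST" and current_block:
--             if len(current_block) > 1:
--                 blocks.append(current_block[:-1])
--             current_block = [opcode]
--
--     if current_block:
--         blocks.append(current_block)
--
--     return blocks
-- ===== SOURCE B (Python) =====
-- from typing import Dict, List
--
-- _TERMINATORS = ("JUMP", "JUMPI", "RETURN", "REVERT", "STOP")
--
-- def _identify_basic_blocks(opcodes: List[Dict]) -> List[List[Dict]]:
--     """Identify basic blocks: repeatedly cut off one maximal leading block.
--
--     A block always contains its first opcode, then extends rightwards until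
--     the previous opcode was a terminator or the next opcode is a JUMPDEST.
--     """
--     blocks = []
--     i, n = 0, len(opcodes)
--     while i < n:
--         j = i + 1
--         while (j < n
--                and opcodes[j - 1]["mnemonic"] not in _TERMINATORS
--                and opcodes[j]["mnemonic"] != "JUMPDEST"):
--             j += 1
--         blocks.append(opcodes[i:j])
--         i = j
--     return blocks
-- ===== Notes on version B (the rewrite author's own statement) =====
-- stated objective: alternative
-- what changed: A folds once over the opcodes maintaining (blocks, current_block) and flushes on boundaries; B instead repeatedly cuts off one maximal leading block (extend while the previous opcode is not a terminator and the next is not a JUMPDEST) and recurses on the remainder.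
import Mathlib
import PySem

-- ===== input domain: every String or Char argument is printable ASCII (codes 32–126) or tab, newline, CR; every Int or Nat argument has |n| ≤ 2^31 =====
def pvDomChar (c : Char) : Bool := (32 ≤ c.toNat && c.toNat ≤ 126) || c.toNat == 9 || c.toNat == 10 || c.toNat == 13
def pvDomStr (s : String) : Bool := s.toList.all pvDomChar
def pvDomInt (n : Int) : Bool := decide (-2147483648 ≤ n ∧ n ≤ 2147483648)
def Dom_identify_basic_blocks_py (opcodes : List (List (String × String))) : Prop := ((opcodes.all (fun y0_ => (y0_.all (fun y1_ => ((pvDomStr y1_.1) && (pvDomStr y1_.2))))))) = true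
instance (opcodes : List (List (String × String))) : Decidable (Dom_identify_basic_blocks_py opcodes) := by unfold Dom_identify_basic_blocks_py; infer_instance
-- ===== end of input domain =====

-- B replaces A's single fold with flush-on-boundary state by a "cut off one maximal
-- leading block, repeat" decomposition (boundary read from the previous/next mnemonic);
-- objective: alternative decomposition, same cost.

-- opcode["mnemonic"]: first-match lookup in the association list; Pre_ guarantees the
-- key is present (Python raises KeyError otherwise), so the "" default is never used.
def pvMnem (op : List (String × String)) : String := (op.lookup "mnemonic").getD ""

def pvIsTerm (s : String) : Bool := (["JUMP", "JUMPI", "RETURN", "REVERT", "STOP"]).contains s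

-- ===== PORT A =====
-- loop body of A: state = (blocks, current_block)
def pvStepA (st : List (List (List (String × String))) × List (List (String × String)))
    (op : List (String × String)) :
    List (List (List (String × String))) × List (List (String × String)) :=
  let cur := st.2 ++ [op]
  if pvIsTerm (pvMnem op) then (st.1 ++ [cur], [])
  else if pvMnem op == "JUMPDEST" && !cur.isEmpty then
    (if 1 < cur.length then st.1 ++ [PySem.List.slice cur none (some (-1))] else st.1, [op])
  else (st.1, cur)

def identify_basic_blocks_py (opcodes : List (List (String × String))) : List (List (List (String × String))) :=
  let st := opcodes.foldl pvStepA ([], [])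
  if st.2.isEmpty then st.1 else st.1 ++ [st.2]

-- ===== PORT B =====
-- B's inner while loop: given the previous opcode of the current block and the remaining
-- opcodes, extend the block until the previous opcode is a terminator or the next is a
-- JUMPDEST; returns (rest of the block, remaining opcodes).
def pvTakeBlock (prev : List (String × String)) (rest : List (List (String × String))) :
    List (List (String × String)) × List (List (String × String)) :=
  match rest with
  | [] => ([], [])
  | op :: rest' =>
    if pvIsTerm (pvMnem prev) || pvMnem op == "JUMPDEST" then ([], op :: rest')
    else
      let p := pvTakeBlock op rest'
      (op :: p.1, p.2)

theorem pvTakeBlock_snd_le (prev : List (String × String)) (rest : List (List (String × String))) :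
    (pvTakeBlock prev rest).2.length ≤ rest.length := by
  induction rest generalizing prev with
  | nil => simp [pvTakeBlock]
  | cons op rest' ih =>
    simp only [pvTakeBlock]
    split
    · simp
    · exact le_trans (ih op) (by simp)

-- B's outer while loop: cut off one maximal leading block, recurse on what is left.
def identify_basic_blocks_py_alt (opcodes : List (List (String × String))) : List (List (List (String × String))) :=
  match opcodes with
  | [] => []
  | op :: rest =>
    let p := pvTakeBlock op rest
    (op :: p.1) :: identify_basic_blocks_py_alt p.2
termination_by opcodes.length
decreasing_by
  exact Nat.lt_succ_of_le (pvTakeBlock_snd_le op rest)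

-- ===== PRECONDITION & SPEC =====
-- Pre_ excludes exactly the inputs where some opcode dict lacks the "mnemonic" key:
-- there Python A raises KeyError (returns nothing).
def Pre_identify_basic_blocks_py (opcodes : List (List (String × String))) : Prop :=
  (opcodes.all (fun op => (op.lookup "mnemonic").isSome)) = true
instance (opcodes : List (List (String × String))) : Decidable (Pre_identify_basic_blocks_py opcodes) := by unfold Pre_identify_basic_blocks_py; infer_instance

def pvWitness_identify_basic_blocks_py : (List (List (String × String))) :=
  [[("mnemonic", "PUSH1"), ("value", "1")], [("mnemonic", "JUMP")], [("mnemonic", "JUMPDEST")], [("mnemonic", "ADD")]]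

def Spec_identify_basic_blocks_py (opcodes : List (List (String × String))) (out : List (List (List (String × String)))) : Prop := out = identify_basic_blocks_py_alt opcodes
instance (opcodes : List (List (String × String))) (out : List (List (List (String × String)))) : Decidable (Spec_identify_basic_blocks_py opcodes out) := by unfold Spec_identify_basic_blocks_py; infer_instance

-- ===== CLAIM (what is proved, stated in full; the proofs are below) =====
def Claim_equal_identify_basic_blocks_py : Prop := ∀ (opcodes : List (List (String × String))), Dom_identify_basic_blocks_py opcodes → Pre_identify_basic_blocks_py opcodes → Spec_identify_basic_blocks_py opcodes (identify_basic_blocks_py opcodes)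

-- ===== LEMMAS AND PROOFS =====

-- A's run from state (blocks := [], current_block := cur), including the final flush.
def pvFinA (cur rest : List (List (String × String))) : List (List (List (String × String))) :=
  let st := rest.foldl pvStepA ([], cur)
  if st.2.isEmpty then st.1 else st.1 ++ [st.2]

theorem pvStepA_shift (blocks : List (List (List (String × String))))
    (cur : List (List (String × String))) (op : List (String × String)) :
    pvStepA (blocks, cur) op = (blocks ++ (pvStepA ([], cur) op).1, (pvStepA ([], cur) op).2) := by
  simp only [pvStepA]
  split_ifs <;> simp

theorem pvFoldA_shift (rest : List (List (String × String)))
    (blocks : List (List (List (String × String)))) (cur : List (List (String × String))) :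
    rest.foldl pvStepA (blocks, cur) =
      (blocks ++ (rest.foldl pvStepA ([], cur)).1, (rest.foldl pvStepA ([], cur)).2) := by
  induction rest generalizing blocks cur with
  | nil => simp
  | cons op rest' ih =>
    simp only [List.foldl_cons]
    rw [pvStepA_shift, ih, ih ((pvStepA ([], cur) op).1) ((pvStepA ([], cur) op).2),
        List.append_assoc]

theorem pvFinA_shift (blocks : List (List (List (String × String))))
    (cur rest : List (List (String × String))) :
    (let st := rest.foldl pvStepA (blocks, cur)
     if st.2.isEmpty then st.1 else st.1 ++ [st.2]) = blocks ++ pvFinA cur rest := by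
  simp only [pvFinA, pvFoldA_shift rest blocks cur]
  split <;> simp

theorem pvTakeBlock_of_term (p : List (String × String)) (rest : List (List (String × String)))
    (h : pvIsTerm (pvMnem p) = true) : pvTakeBlock p rest = ([], rest) := by
  cases rest with
  | nil => simp [pvTakeBlock]
  | cons op rest' => simp [pvTakeBlock, h]

theorem pvTerm_not_jumpdest (s : String) (h : pvIsTerm s = true) : (s == "JUMPDEST") = false := by
  simp only [pvIsTerm, List.contains_eq_mem, List.mem_cons, List.not_mem_nil, or_false,
    decide_eq_true_eq] at h
  rcases h with rfl | rfl | rfl | rfl | rfl <;> rfl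

theorem pvMain : ∀ (n : Nat) (rest : List (List (String × String))), rest.length ≤ n →
    (pvFinA [] rest = identify_basic_blocks_py_alt rest) ∧
    (∀ (init : List (List (String × String))) (p : List (String × String)),
      pvIsTerm (pvMnem p) = false →
      pvFinA (init ++ [p]) rest =
        ((init ++ [p]) ++ (pvTakeBlock p rest).1) :: identify_basic_blocks_py_alt (pvTakeBlock p rest).2) := by
  intro n
  induction n with
  | zero =>
    intro rest h
    have : rest = [] := List.eq_nil_of_length_eq_zero (Nat.le_zero.mp h)
    subst this
    refine ⟨by simp [pvFinA, identify_basic_blocks_py_alt], ?_⟩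
    intro init p _
    simp [pvFinA, pvTakeBlock, identify_basic_blocks_py_alt]
  | succ n ih =>
    intro rest hlen
    cases rest with
    | nil =>
      refine ⟨by simp [pvFinA, identify_basic_blocks_py_alt], ?_⟩
      intro init p _
      simp [pvFinA, pvTakeBlock, identify_basic_blocks_py_alt]
    | cons op rest' =>
      have hr : rest'.length ≤ n := by simpa using Nat.le_of_succ_le_succ hlen
      constructor
      · -- current block empty
        by_cases hterm : pvIsTerm (pvMnem op) = true
        · have hstep : pvStepA ([], []) op = ([[op]], []) := by
            simp [pvStepA, hterm]
          calc pvFinA [] (op :: rest')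
              = [[op]] ++ pvFinA [] rest' := by
                simp only [pvFinA, List.foldl_cons, hstep]
                exact pvFinA_shift [[op]] [] rest'
            _ = [op] :: identify_basic_blocks_py_alt rest' := by
                rw [(ih rest' hr).1]; rfl
            _ = identify_basic_blocks_py_alt (op :: rest') := by
                rw [identify_basic_blocks_py_alt]
                simp [pvTakeBlock_of_term op rest' hterm]
        · have hterm' : pvIsTerm (pvMnem op) = false := by simpa using hterm
          have hstep : pvStepA ([], []) op = ([], [op]) := by
            simp only [pvStepA, hterm']
            split <;> simp_all
          have h2 := (ih rest' hr).2 [] op hterm'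
          simp only [List.nil_append] at h2
          calc pvFinA [] (op :: rest')
              = pvFinA [op] rest' := by
                simp only [pvFinA, List.foldl_cons, hstep]
            _ = ([op] ++ (pvTakeBlock op rest').1) :: identify_basic_blocks_py_alt (pvTakeBlock op rest').2 := by
                rw [h2]
            _ = identify_basic_blocks_py_alt (op :: rest') := by
                rw [identify_basic_blocks_py_alt]; simp
      · -- current block init ++ [p], p not a terminator
        intro init p hp
        by_cases hterm : pvIsTerm (pvMnem op) = true
        · have hstep : pvStepA ([], init ++ [p]) op = ([init ++ [p] ++ [op]], []) := by
            simp [pvStepA, hterm]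
          have htb : pvTakeBlock p (op :: rest') = ([op], rest') := by
            simp [pvTakeBlock, hp, pvTerm_not_jumpdest _ hterm, pvTakeBlock_of_term op rest' hterm]
          calc pvFinA (init ++ [p]) (op :: rest')
              = [init ++ [p] ++ [op]] ++ pvFinA [] rest' := by
                simp only [pvFinA, List.foldl_cons, hstep]
                exact pvFinA_shift [init ++ [p] ++ [op]] [] rest'
            _ = ((init ++ [p]) ++ (pvTakeBlock p (op :: rest')).1) ::
                  identify_basic_blocks_py_alt (pvTakeBlock p (op :: rest')).2 := by
                rw [(ih rest' hr).1, htb]; simp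
        · have hterm' : pvIsTerm (pvMnem op) = false := by simpa using hterm
          by_cases hjd : (pvMnem op == "JUMPDEST") = true
          · have hlen2 : 1 < (init ++ [p] ++ [op]).length := by simp
            have hstep : pvStepA ([], init ++ [p]) op = ([init ++ [p]], [op]) := by
              simp [pvStepA, hterm', hjd, PySem.List.slice_to_neg_one]
            have htb : pvTakeBlock p (op :: rest') = ([], op :: rest') := by
              simp [pvTakeBlock, hjd]
            have h2 := (ih rest' hr).2 [] op hterm'
            simp only [List.nil_append] at h2
            calc pvFinA (init ++ [p]) (op :: rest')
                = [init ++ [p]] ++ pvFinA [op] rest' := by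
                  simp only [pvFinA, List.foldl_cons, hstep]
                  exact pvFinA_shift [init ++ [p]] [op] rest'
              _ = (init ++ [p]) :: (([op] ++ (pvTakeBlock op rest').1) :: identify_basic_blocks_py_alt (pvTakeBlock op rest').2) := by
                  rw [h2]; simp
              _ = ((init ++ [p]) ++ (pvTakeBlock p (op :: rest')).1) ::
                    identify_basic_blocks_py_alt (pvTakeBlock p (op :: rest')).2 := by
                  rw [htb, identify_basic_blocks_py_alt]
                  simp
          · have hjd' : (pvMnem op == "JUMPDEST") = false := by simpa using hjd
            have hstep : pvStepA ([], init ++ [p]) op = ([], init ++ [p] ++ [op]) := by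
              simp [pvStepA, hterm', hjd']
            have htb : pvTakeBlock p (op :: rest') = (op :: (pvTakeBlock op rest').1, (pvTakeBlock op rest').2) := by
              simp [pvTakeBlock, hp, hjd']
            have h2 := (ih rest' hr).2 (init ++ [p]) op hterm'
            calc pvFinA (init ++ [p]) (op :: rest')
                = pvFinA ((init ++ [p]) ++ [op]) rest' := by
                  simp only [pvFinA, List.foldl_cons, hstep]
              _ = (((init ++ [p]) ++ [op]) ++ (pvTakeBlock op rest').1) ::
                    identify_basic_blocks_py_alt (pvTakeBlock op rest').2 := h2
              _ = ((init ++ [p]) ++ (pvTakeBlock p (op :: rest')).1) ::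
                    identify_basic_blocks_py_alt (pvTakeBlock p (op :: rest')).2 := by
                  rw [htb]; simp

-- ===== VERDICT (by name: the statement is the Claim_ definition above) =====
theorem identify_basic_blocks_py_spec : Claim_equal_identify_basic_blocks_py := by
  intro opcodes _ _
  show identify_basic_blocks_py opcodes = identify_basic_blocks_py_alt opcodes
  have h := (pvMain opcodes.length opcodes (le_refl _)).1
  simpa [identify_basic_blocks_py, pvFinA] using h
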